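-- pv_equiv track=rewrite | github.com/KwonTaeyong/Python_v7 | learning145.py | solution
-- ===== SOURCE A (Python) =====
-- def solution(grid):
--     n = len(grid)
--     m = len(grid[0])
--
--     # 각 칸당 2개의 삼각형
--     def tid(i, j, t):
--         return (i * m + j) * 2 + t
--
--     size = 2 * n * m
--     parent = list(range(size))
--     cnt = [1] * size
--
--     def find(x):
--         while parent[x] != x:
--             parent[x] = parent[parent[x]]
--             x = parent[x]
--         return x
--
--     def union(a, b):
--         ra, rb = find(a), find(b)
--         if ra != rb:
--             parent[rb] = ra
--             cnt[ra] += cnt[rb]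
--
--     for i in range(n):
--         for j in range(m):
--             d = grid[i][j]
--
--             if d == 1:  # /
--                 # triangle 0: up, left
--                 # triangle 1: down, right
--                 if i > 0:
--                     union(tid(i, j, 0), tid(i - 1, j, 1))
--                 if j > 0:
--                     union(tid(i, j, 0), tid(i, j - 1, 1))
--                 if i < n - 1:
--                     union(tid(i, j, 1), tid(i + 1, j, 0))
--                 if j < m - 1:
--                     union(tid(i, j, 1), tid(i, j + 1, 0))
--
--             else:  # \
--                 # triangle 0: up, right
--                 # triangle 1: down, left
--                 if i > 0:
--                     union(tid(i, j, 0), tid(i - 1, j, 1))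
--                 if j < m - 1:
--                     union(tid(i, j, 0), tid(i, j + 1, 1))
--                 if i < n - 1:
--                     union(tid(i, j, 1), tid(i + 1, j, 0))
--                 if j > 0:
--                     union(tid(i, j, 1), tid(i, j - 1, 0))
--
--     answer = 0
--     for i in range(size):
--         if parent[i] == i:
--             answer = max(answer, cnt[i])
--
--     return answer
-- ===== SOURCE B (Python) =====
-- def solution(grid):
--     n = len(grid)
--     m = len(grid[0])
--     size = 2 * n * m
--
--     def tid(i, j, t):
--         return (i * m + j) * 2 + t
--
--     # Stage 1: collect the merge operations as an explicit edge list.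
--     edges = []
--     for i in range(n):
--         for j in range(m):
--             if grid[i][j] == 1:  # /
--                 cell = (([(tid(i, j, 0), tid(i - 1, j, 1))] if i > 0 else [])
--                         + ([(tid(i, j, 0), tid(i, j - 1, 1))] if j > 0 else [])
--                         + ([(tid(i, j, 1), tid(i + 1, j, 0))] if i < n - 1 else [])
--                         + ([(tid(i, j, 1), tid(i, j + 1, 0))] if j < m - 1 else []))
--             else:  # \
--                 cell = (([(tid(i, j, 0), tid(i - 1, j, 1))] if i > 0 else [])
--                         + ([(tid(i, j, 0), tid(i, j + 1, 1))] if j < m - 1 else [])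
--                         + ([(tid(i, j, 1), tid(i + 1, j, 0))] if i < n - 1 else [])
--                         + ([(tid(i, j, 1), tid(i, j - 1, 0))] if j > 0 else []))
--             edges += cell
--
--     # Stage 2: quick-find — label[x] is directly the representative of x's component.
--     label = list(range(size))
--     for a, b in edges:
--         la, lb = label[a], label[b]
--         if la != lb:
--             label = [la if v == lb else v for v in label]
--
--     # Stage 3: the largest component is the most frequent representative label.
--     best = 0
--     for r in range(size):
--         if label[r] == r:
--             best = max(best, label.count(r))
--     return best
-- ===== Notes on version B (the rewrite author's own statement) =====
-- stated objective: alternative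
-- what changed: Replaces the interleaved parent-forest union-find (quick-union with path halving and per-root size counters) by a staged pipeline: first build an explicit list of merge edges from the grid, then run a quick-find relabelling pass over that edge list, and finally take the maximum occurrence count of a representative label.
import Mathlib
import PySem

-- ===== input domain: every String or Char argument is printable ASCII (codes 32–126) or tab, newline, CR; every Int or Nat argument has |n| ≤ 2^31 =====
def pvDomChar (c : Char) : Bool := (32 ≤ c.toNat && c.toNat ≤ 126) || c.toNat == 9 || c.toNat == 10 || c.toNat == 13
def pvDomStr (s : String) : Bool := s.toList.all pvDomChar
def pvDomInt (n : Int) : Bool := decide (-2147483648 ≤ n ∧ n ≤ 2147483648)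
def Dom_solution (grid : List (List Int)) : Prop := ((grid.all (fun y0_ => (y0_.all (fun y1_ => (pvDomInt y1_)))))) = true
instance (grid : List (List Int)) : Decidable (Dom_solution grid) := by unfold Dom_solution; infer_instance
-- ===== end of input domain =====

-- B replaces A's interleaved parent-forest union-find (path halving + per-root size
-- counters) by a staged pipeline: build an explicit edge list from the grid, run a
-- quick-find relabelling pass over it, then count labels; equivalence of the returned
-- value is proved (alternative, not faster).

-- ===== PORT A =====
def pvTid (m i j t : Nat) : Nat := (i * m + j) * 2 + t

-- Python's `while parent[x] != x:` with path halving.  Fueled by `parent.length`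
-- (= `size`): exact on every state A reaches, because the parent array is a forest,
-- so the root is reached in fewer than `size` plain steps (proved in `findGo_correct`).
def findGo (p : List Nat) (x : Nat) : Nat → List Nat × Nat
  | 0 => (p, x)
  | fuel+1 =>
    let px := p.getD x 0
    if px = x then (p, x)
    else findGo (p.set x (p.getD px 0)) (p.getD px 0) fuel

def findA (p : List Nat) (x : Nat) : List Nat × Nat := findGo p x p.length

def unionA (pc : List Nat × List Int) (a b : Nat) : List Nat × List Int :=
  let f1 := findA pc.1 a
  let f2 := findA f1.1 b
  if f1.2 ≠ f2.2 then
    (f2.1.set f2.2 f1.2, pc.2.set f1.2 (pc.2.getD f1.2 0 + pc.2.getD f2.2 0))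
  else (f2.1, pc.2)

-- `if <cond>: union(a, b)` — one guarded union statement of A's cell body
def condUnion (c : Prop) [Decidable c] (pc : List Nat × List Int) (a b : Nat) :
    List Nat × List Int :=
  if c then unionA pc a b else pc

def cellA (n m : Nat) (d : Int) (i j : Nat) (pc : List Nat × List Int) : List Nat × List Int :=
  if d = 1 then
    condUnion (j < m - 1)
      (condUnion (i < n - 1)
        (condUnion (0 < j)
          (condUnion (0 < i) pc (pvTid m i j 0) (pvTid m (i-1) j 1))
          (pvTid m i j 0) (pvTid m i (j-1) 1))
        (pvTid m i j 1) (pvTid m (i+1) j 0))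
      (pvTid m i j 1) (pvTid m i (j+1) 0)
  else
    condUnion (0 < j)
      (condUnion (i < n - 1)
        (condUnion (j < m - 1)
          (condUnion (0 < i) pc (pvTid m i j 0) (pvTid m (i-1) j 1))
          (pvTid m i j 0) (pvTid m i (j+1) 1))
        (pvTid m i j 1) (pvTid m (i+1) j 0))
      (pvTid m i j 1) (pvTid m i (j-1) 0)

def loopA (grid : List (List Int)) (n m : Nat) : List Nat × List Int :=
  (List.range n).foldl
    (fun pc i => (List.range m).foldl
      (fun pc j => cellA n m ((grid.getD i []).getD j 0) i j pc) pc)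
    (List.range (2*n*m), List.replicate (2*n*m) (1:Int))

def solution (grid : List (List Int)) : Int :=
  let n := grid.length
  let m := (grid.headD []).length
  let pc := loopA grid n m
  (List.range (2*n*m)).foldl
    (fun ans i => if pc.1.getD i 0 = i then max ans (pc.2.getD i 0) else ans) 0

-- ===== PORT B =====
-- Stage 1: the merge edges contributed by one cell, in program order
def edgesOfCell (n m : Nat) (d : Int) (i j : Nat) : List (Nat × Nat) :=
  if d = 1 then
    (if 0 < i then [(pvTid m i j 0, pvTid m (i-1) j 1)] else []) ++
    (if 0 < j then [(pvTid m i j 0, pvTid m i (j-1) 1)] else []) ++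
    (if i < n - 1 then [(pvTid m i j 1, pvTid m (i+1) j 0)] else []) ++
    (if j < m - 1 then [(pvTid m i j 1, pvTid m i (j+1) 0)] else [])
  else
    (if 0 < i then [(pvTid m i j 0, pvTid m (i-1) j 1)] else []) ++
    (if j < m - 1 then [(pvTid m i j 0, pvTid m i (j+1) 1)] else []) ++
    (if i < n - 1 then [(pvTid m i j 1, pvTid m (i+1) j 0)] else []) ++
    (if 0 < j then [(pvTid m i j 1, pvTid m i (j-1) 0)] else [])

def edgeList (grid : List (List Int)) (n m : Nat) : List (Nat × Nat) :=
  (List.range n).flatMap (fun i =>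
    (List.range m).flatMap (fun j =>
      edgesOfCell n m ((grid.getD i []).getD j 0) i j))

-- Stage 2: quick-find — the label array stores each node's representative directly
def mergeB (l : List Nat) (a b : Nat) : List Nat :=
  let la := l.getD a 0
  let lb := l.getD b 0
  if la ≠ lb then l.map (fun v => if v = lb then la else v) else l

def solution_alt (grid : List (List Int)) : Int :=
  let n := grid.length
  let m := (grid.headD []).length
  let lab := (edgeList grid n m).foldl (fun l e => mergeB l e.1 e.2) (List.range (2*n*m))
  -- Stage 3: the largest component is the most frequent representative label
  (List.range (2*n*m)).foldl
    (fun best r => if lab.getD r 0 = r then max best ((lab.count r : Int)) else best) 0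

-- ===== PRECONDITION & SPEC =====
-- Pre_ excludes exactly the inputs on which the Python A raises IndexError:
-- the empty grid (grid[0]) and grids with a row shorter than the first row (grid[i][j]).
def Pre_solution (grid : List (List Int)) : Prop :=
  grid ≠ [] ∧ ∀ row ∈ grid, (grid.headD []).length ≤ row.length
instance (grid : List (List Int)) : Decidable (Pre_solution grid) := by
  unfold Pre_solution; infer_instance

def pvWitness_solution : List (List Int) := [[1, 0], [0, 1]]

def Spec_solution (grid : List (List Int)) (out : Int) : Prop := out = solution_alt grid
instance (grid : List (List Int)) (out : Int) : Decidable (Spec_solution grid out) := by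
  unfold Spec_solution; infer_instance

-- ===== CLAIM (what is proved, stated in full; the proofs are below) =====
def Claim_equal_solution : Prop :=
  ∀ (grid : List (List Int)), Dom_solution grid → Pre_solution grid →
    Spec_solution grid (solution grid)

-- ===== LEMMAS AND PROOFS =====

-- plain iteration of the parent map (the specification device for A's forest)
def iterP (p : List Nat) : Nat → Nat → Nat
  | 0, x => x
  | k+1, x => iterP p k (p.getD x 0)

-- label invariant: labels are in range and idempotent
def LABok (sz : Nat) (lab : List Nat) : Prop :=
  lab.length = sz ∧
  (∀ y, y < sz → lab.getD y 0 < sz ∧ lab.getD (lab.getD y 0) 0 = lab.getD y 0)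

-- forest invariant: parent steps stay in range, preserve the label, labels are roots,
-- and every node's plain parent iteration reaches its label
def INVp (sz : Nat) (lab p : List Nat) : Prop :=
  p.length = sz ∧
  (∀ y, y < sz → p.getD y 0 < sz ∧ lab.getD (p.getD y 0) 0 = lab.getD y 0 ∧
      p.getD (lab.getD y 0) 0 = lab.getD y 0) ∧
  (∀ y, y < sz → ∃ k, iterP p k y = lab.getD y 0)

-- counter invariant: at every root, A's counter is the number of nodes with that label
def CNTok (sz : Nat) (lab p : List Nat) (c : List Int) : Prop :=
  c.length = sz ∧
  ∀ r, r < sz → p.getD r 0 = r → c.getD r 0 = (lab.count r : Int)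

def GOOD (sz : Nat) (lab p : List Nat) (c : List Int) : Prop :=
  LABok sz lab ∧ INVp sz lab p ∧ CNTok sz lab p c

lemma getD_set' (l : List Nat) (i j a : Nat) (hi : i < l.length) :
    (l.set i a).getD j 0 = if j = i then a else l.getD j 0 := by
  rw [List.getD, List.getElem?_set]
  by_cases h : i = j
  · subst h; simp [hi]
  · simp [h, List.getD, Ne.symm h]

lemma getD_map' (l : List Nat) (f : Nat → Nat) (j : Nat) (hj : j < l.length) :
    (l.map f).getD j 0 = f (l.getD j 0) := by
  simp [List.getD, List.getElem?_eq_getElem hj]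

lemma getD_range' (sz y : Nat) (hy : y < sz) : (List.range sz).getD y 0 = y := by
  simp [List.getD, hy]

lemma iterP_add (p : List Nat) (a b x : Nat) :
    iterP p (a+b) x = iterP p a (iterP p b x) := by
  induction b generalizing x with
  | zero => rfl
  | succ b ih => rw [show a + (b+1) = (a+b)+1 by omega]; exact ih (p.getD x 0)

lemma iterP_succ' (p : List Nat) (k x : Nat) :
    iterP p (k+1) x = p.getD (iterP p k x) 0 := by
  induction k generalizing x with
  | zero => rfl
  | succ k ih => exact ih (p.getD x 0)

lemma iterP_fix (p : List Nat) (r : Nat) (h : p.getD r 0 = r) (k : Nat) :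
    iterP p k r = r := by
  induction k with
  | zero => rfl
  | succ k ih => rw [iterP_succ', ih, h]

lemma iterP_lt (p : List Nat) (sz : Nat) (hp : ∀ y, y < sz → p.getD y 0 < sz)
    (x : Nat) (hx : x < sz) (k : Nat) : iterP p k x < sz := by
  induction k generalizing x with
  | zero => exact hx
  | succ k ih => exact ih _ (hp x hx)

-- pigeonhole: the least number of steps to reach the (fixed) root is < sz
lemma reach_lt_size (p : List Nat) (sz : Nat) (hp : ∀ y, y < sz → p.getD y 0 < sz)
    (x r : Nat) (hx : x < sz) (h : ∃ k, iterP p k x = r) :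
    ∃ k, k < sz ∧ iterP p k x = r := by
  classical
  refine ⟨Nat.find h, ?_, Nat.find_spec h⟩
  by_contra hk
  push_neg at hk
  have hinj : Function.Injective
      (fun i : Fin (Nat.find h + 1) => (⟨iterP p i x, iterP_lt p sz hp x hx i⟩ : Fin sz)) := by
    intro i j hij
    simp only [Fin.mk.injEq] at hij
    by_contra hne
    rcases Nat.lt_or_ge i.val j.val with hlt | hge
    · have hr' : iterP p (Nat.find h - j.val + i.val) x = r := by
        have h1 : iterP p (Nat.find h - j.val + i.val) x
            = iterP p (Nat.find h - j.val) (iterP p i.val x) := iterP_add ..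
        have h2 : iterP p (Nat.find h - j.val + j.val) x
            = iterP p (Nat.find h - j.val) (iterP p j.val x) := iterP_add ..
        rw [h1, hij, ← h2, Nat.sub_add_cancel (by omega : j.val ≤ Nat.find h)]
        exact Nat.find_spec h
      exact Nat.find_min h (show Nat.find h - j.val + i.val < Nat.find h by omega) hr'
    · rcases Nat.lt_or_ge j.val i.val with hlt2 | hge2
      · have hr' : iterP p (Nat.find h - i.val + j.val) x = r := by
          have h1 : iterP p (Nat.find h - i.val + j.val) x
              = iterP p (Nat.find h - i.val) (iterP p j.val x) := iterP_add ..
          have h2 : iterP p (Nat.find h - i.val + i.val) x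
              = iterP p (Nat.find h - i.val) (iterP p i.val x) := iterP_add ..
          rw [h1, ← hij, ← h2, Nat.sub_add_cancel (by omega : i.val ≤ Nat.find h)]
          exact Nat.find_spec h
        exact Nat.find_min h (show Nat.find h - i.val + j.val < Nat.find h by omega) hr'
      · exact hne (Fin.ext (by omega))
  have := Fintype.card_le_of_injective _ hinj
  simp only [Fintype.card_fin] at this
  omega

-- effect of A's path-halving step `parent[x] = parent[parent[x]]` on the invariants
lemma compress (sz : Nat) (lab p : List Nat) (x : Nat)
    (hL : LABok sz lab) (hI : INVp sz lab p) (hx : x < sz) :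
    INVp sz lab (p.set x (p.getD (p.getD x 0) 0)) ∧
    (∀ k y, y < sz → iterP p k y = lab.getD y 0 →
      ∃ k' ≤ k, iterP (p.set x (p.getD (p.getD x 0) 0)) k' y = lab.getD y 0) ∧
    (∀ y, y < sz → ((p.set x (p.getD (p.getD x 0) 0)).getD y 0 = y ↔ p.getD y 0 = y)) := by
  obtain ⟨hlen, hstep, hconv⟩ := hI
  obtain ⟨hlablen, hlab⟩ := hL
  have hq : ∀ y, (p.set x (p.getD (p.getD x 0) 0)).getD y 0
      = if y = x then p.getD (p.getD x 0) 0 else p.getD y 0 := by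
    intro y; exact getD_set' p x y _ (hlen ▸ hx)
  have hpxlt : p.getD x 0 < sz := (hstep x hx).1
  have hzlt : p.getD (p.getD x 0) 0 < sz := (hstep _ hpxlt).1
  have hlabz : lab.getD (p.getD (p.getD x 0) 0) 0 = lab.getD x 0 := by
    rw [(hstep _ hpxlt).2.1, (hstep x hx).2.1]
  have transfer : ∀ k y, y < sz → iterP p k y = lab.getD y 0 →
      ∃ k' ≤ k, iterP (p.set x (p.getD (p.getD x 0) 0)) k' y = lab.getD y 0 := by
    intro k
    induction k using Nat.strong_induction_on with
    | _ k ih =>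
      intro y hy hiter
      match k with
      | 0 => exact ⟨0, Nat.le_refl 0, hiter⟩
      | Nat.succ k =>
        by_cases hyx : y = x
        · by_cases hpxx : p.getD x 0 = x
          · -- x is already a root, so its label is x itself
            have hfix : iterP p (k+1) y = y := by
              rw [hyx]; exact iterP_fix p x hpxx (k+1)
            exact ⟨0, Nat.zero_le _, by rw [← hiter, hfix]; rfl⟩
          · match k with
            | 0 =>
              have hpxlab : p.getD x 0 = lab.getD y 0 := by
                rw [← hiter, hyx]; rfl
              have hzeq : p.getD (p.getD x 0) 0 = lab.getD y 0 := by
                rw [hpxlab, hyx]; exact (hstep x hx).2.2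
              refine ⟨1, by omega, ?_⟩
              show iterP (p.set x (p.getD (p.getD x 0) 0)) 0
                  ((p.set x (p.getD (p.getD x 0) 0)).getD y 0) = lab.getD y 0
              rw [hq, if_pos hyx]; exact hzeq
            | Nat.succ k =>
              have hiter2 : iterP p k (p.getD (p.getD x 0) 0) = lab.getD y 0 := by
                have h0 : iterP p (k+2) x = iterP p k (p.getD (p.getD x 0) 0) := rfl
                rw [hyx, ← h0]
                rw [hyx] at hiter
                exact hiter
              have hlabz' : lab.getD (p.getD (p.getD x 0) 0) 0 = lab.getD y 0 := by
                rw [hlabz, hyx]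
              obtain ⟨k', hk', hq'⟩ := ih k (by omega) _ hzlt (by rw [hlabz']; exact hiter2)
              refine ⟨k' + 1, by omega, ?_⟩
              show iterP (p.set x (p.getD (p.getD x 0) 0)) k'
                  ((p.set x (p.getD (p.getD x 0) 0)).getD y 0) = lab.getD y 0
              rw [hq, if_pos hyx, ← hlabz']; exact hq'
        · have hiter' : iterP p k (p.getD y 0) = lab.getD y 0 := hiter
          have hpy : p.getD y 0 < sz := (hstep y hy).1
          have hlabpy : lab.getD (p.getD y 0) 0 = lab.getD y 0 := (hstep y hy).2.1
          obtain ⟨k', hk', hq'⟩ := ih k (by omega) (p.getD y 0) hpy (by rw [hlabpy]; exact hiter')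
          refine ⟨k' + 1, by omega, ?_⟩
          show iterP (p.set x (p.getD (p.getD x 0) 0)) k'
              ((p.set x (p.getD (p.getD x 0) 0)).getD y 0) = lab.getD y 0
          rw [hq, if_neg hyx, ← hlabpy]; exact hq'
  have hroots : ∀ y, y < sz →
      ((p.set x (p.getD (p.getD x 0) 0)).getD y 0 = y ↔ p.getD y 0 = y) := by
    intro y hy
    by_cases hyx : y = x
    · subst hyx
      rw [hq, if_pos rfl]
      constructor
      · intro hzx
        by_contra hpxx
        have hpxx' : p.getD y 0 ≠ y := hpxx
        have cyc : ∀ k, iterP p k y = y ∨ iterP p k y = p.getD y 0 := by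
          intro k
          induction k with
          | zero => exact Or.inl rfl
          | succ k ihk =>
            rcases ihk with h1 | h1
            · right; rw [iterP_succ', h1]
            · left; rw [iterP_succ', h1, hzx]
        obtain ⟨k, hk⟩ := hconv y hy
        have hroot : p.getD (lab.getD y 0) 0 = lab.getD y 0 := (hstep y hy).2.2
        rcases cyc k with h1 | h1
        · have h2 : lab.getD y 0 = y := by rw [← hk, h1]
          rw [h2] at hroot
          exact hpxx' hroot
        · have h2 : lab.getD y 0 = p.getD y 0 := by rw [← hk, h1]
          rw [h2] at hroot
          rw [hzx] at hroot
          exact hpxx' hroot.symm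
      · intro hpxy
        rw [hpxy, hpxy]
    · rw [hq, if_neg hyx]
  refine ⟨⟨by simp [hlen], ?_, ?_⟩, transfer, hroots⟩
  · intro y hy
    rw [hq]
    by_cases hyx : y = x
    · rw [if_pos hyx]
      refine ⟨hzlt, by rw [hlabz, hyx], ?_⟩
      rw [hq]
      by_cases hlx : lab.getD y 0 = x
      · rw [if_pos hlx]
        have hr : p.getD (lab.getD y 0) 0 = lab.getD y 0 := (hstep y hy).2.2
        rw [hlx] at hr
        rw [hr, hr, hlx]
      · rw [if_neg hlx]; exact (hstep y hy).2.2
    · rw [if_neg hyx]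
      refine ⟨(hstep y hy).1, (hstep y hy).2.1, ?_⟩
      rw [hq]
      by_cases hlx : lab.getD y 0 = x
      · rw [if_pos hlx]
        have hr : p.getD (lab.getD y 0) 0 = lab.getD y 0 := (hstep y hy).2.2
        rw [hlx] at hr
        rw [hr, hr, hlx]
      · rw [if_neg hlx]; exact (hstep y hy).2.2
  · intro y hy
    obtain ⟨k, hk⟩ := hconv y hy
    obtain ⟨k', _, hk'⟩ := transfer k y hy hk
    exact ⟨k', hk'⟩

-- A's find loop returns the node's label, keeps the invariants, and preserves the root set
lemma findGo_correct (sz : Nat) (lab : List Nat) (hL : LABok sz lab) :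
    ∀ fuel p x k, INVp sz lab p → x < sz → k ≤ fuel → iterP p k x = lab.getD x 0 →
      (findGo p x fuel).2 = lab.getD x 0 ∧ INVp sz lab (findGo p x fuel).1 ∧
      (∀ y, y < sz → ((findGo p x fuel).1.getD y 0 = y ↔ p.getD y 0 = y)) := by
  intro fuel
  induction fuel with
  | zero =>
    intro p x k hI hx hk hiter
    interval_cases k
    exact ⟨hiter.symm ▸ rfl, hI, fun y _ => Iff.rfl⟩
  | succ fuel ih =>
    intro p x k hI hx hk hiter
    by_cases hpx : p.getD x 0 = x
    · have hres : findGo p x (fuel+1) = (p, x) := by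
        rw [findGo]; split_ifs; rfl
      have hlabx : lab.getD x 0 = x := by
        rw [← hiter, iterP_fix p x hpx]
      rw [hres]
      exact ⟨hlabx.symm, hI, fun y _ => Iff.rfl⟩
    · have hres : findGo p x (fuel+1)
          = findGo (p.set x (p.getD (p.getD x 0) 0)) (p.getD (p.getD x 0) 0) fuel := by
        rw [findGo]; split_ifs; rfl
      obtain ⟨hIq, htrans, hroots⟩ := compress sz lab p x hL hI hx
      obtain ⟨hlen, hstep, hconv⟩ := hI
      have hpxlt : p.getD x 0 < sz := (hstep x hx).1
      have hzlt : p.getD (p.getD x 0) 0 < sz := (hstep _ hpxlt).1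
      have hlabz : lab.getD (p.getD (p.getD x 0) 0) 0 = lab.getD x 0 := by
        rw [(hstep _ hpxlt).2.1, (hstep x hx).2.1]
      have hzreach : ∃ kz ≤ fuel, iterP p kz (p.getD (p.getD x 0) 0)
          = lab.getD (p.getD (p.getD x 0) 0) 0 := by
        match k with
        | 0 =>
          exfalso
          have : x = lab.getD x 0 := hiter
          have hr : p.getD (lab.getD x 0) 0 = lab.getD x 0 := (hstep x hx).2.2
          rw [← this] at hr
          exact hpx hr
        | 1 =>
          have hpxlab : p.getD x 0 = lab.getD x 0 := hiter
          refine ⟨0, Nat.zero_le _, ?_⟩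
          show p.getD (p.getD x 0) 0 = _
          rw [hlabz, hpxlab]
          exact (hstep x hx).2.2
        | Nat.succ (Nat.succ k) =>
          have h0 : iterP p (k+2) x = iterP p k (p.getD (p.getD x 0) 0) := rfl
          refine ⟨k, by omega, ?_⟩
          rw [hlabz, ← h0]
          exact hiter
      obtain ⟨kz, hkz, hziter⟩ := hzreach
      obtain ⟨kz', hkz', hziter'⟩ := htrans kz _ hzlt hziter
      have main := ih (p.set x (p.getD (p.getD x 0) 0)) (p.getD (p.getD x 0) 0) kz'
        hIq hzlt (by omega) hziter'
      rw [hres]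
      refine ⟨by rw [main.1, hlabz], main.2.1, fun y hy => ?_⟩
      exact (main.2.2 y hy).trans (hroots y hy)

-- wrapper: Python's find(x) with the invariants in force
lemma findA_correct (sz : Nat) (lab p : List Nat) (x : Nat)
    (hL : LABok sz lab) (hI : INVp sz lab p) (hx : x < sz) :
    (findA p x).2 = lab.getD x 0 ∧ INVp sz lab (findA p x).1 ∧
    (∀ y, y < sz → ((findA p x).1.getD y 0 = y ↔ p.getD y 0 = y)) := by
  obtain ⟨hlen, hstep, hconv⟩ := hI
  obtain ⟨k, hk, hiter⟩ := reach_lt_size p sz (fun y hy => (hstep y hy).1) x (lab.getD x 0)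
    hx (hconv x hx)
  have := findGo_correct sz lab hL p.length p x k ⟨hlen, hstep, hconv⟩ hx
    (by omega) hiter
  exact this

-- linking the root rb under ra: nodes whose label is not rb keep their convergence
lemma iter_set_ne (sz : Nat) (lab p : List Nat) (rb ra : Nat)
    (hlen : p.length = sz) (hrb : rb < sz)
    (hp : ∀ y, y < sz → p.getD y 0 < sz)
    (hlabp : ∀ y, y < sz → lab.getD (p.getD y 0) 0 = lab.getD y 0)
    (hlabrb : lab.getD rb 0 = rb) :
    ∀ k y, y < sz → lab.getD y 0 ≠ rb → iterP p k y = lab.getD y 0 →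
      iterP (p.set rb ra) k y = lab.getD y 0 := by
  intro k
  induction k with
  | zero => intro y _ _ h; exact h
  | succ k ih =>
    intro y hy hlne hiter
    have hyrb : y ≠ rb := fun h => hlne (by rw [h, hlabrb])
    have hqy : (p.set rb ra).getD y 0 = p.getD y 0 := by
      rw [getD_set' p rb y ra (hlen ▸ hrb), if_neg hyrb]
    have hstep : iterP (p.set rb ra) (k+1) y = iterP (p.set rb ra) k (p.getD y 0) := by
      show iterP (p.set rb ra) k ((p.set rb ra).getD y 0) = _
      rw [hqy]
    rw [hstep, ← hlabp y hy]
    exact ih (p.getD y 0) (hp y hy) (by rw [hlabp y hy]; exact hlne)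
      (by rw [hlabp y hy]; exact hiter)

-- nodes that converge to rb now converge to ra (two more steps suffice)
lemma iter_set_rb (sz : Nat) (p : List Nat) (rb ra : Nat)
    (hlen : p.length = sz) (hrb : rb < sz) (hra : ra < sz)
    (hp : ∀ y, y < sz → p.getD y 0 < sz)
    (hpra : p.getD ra 0 = ra) (hne : ra ≠ rb) :
    ∀ k y, y < sz → iterP p k y = rb → iterP (p.set rb ra) (k+2) y = ra := by
  have hq : ∀ y, (p.set rb ra).getD y 0 = if y = rb then ra else p.getD y 0 :=
    fun y => getD_set' p rb y ra (hlen ▸ hrb)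
  have hqra : (p.set rb ra).getD ra 0 = ra := by rw [hq, if_neg hne, hpra]
  intro k
  induction k with
  | zero =>
    intro y _ h
    have hy' : y = rb := h
    show (p.set rb ra).getD ((p.set rb ra).getD y 0) 0 = ra
    have h2 : (p.set rb ra).getD y 0 = ra := by rw [hy', hq, if_pos rfl]
    rw [h2, hqra]
  | succ k ih =>
    intro y hy hiter
    by_cases hyrb : y = rb
    · have h1 : iterP (p.set rb ra) (k+3) y = iterP (p.set rb ra) (k+2) ((p.set rb ra).getD y 0) := rfl
      have h2 : (p.set rb ra).getD y 0 = ra := by rw [hyrb, hq, if_pos rfl]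
      rw [h1, h2]
      exact iterP_fix _ ra hqra (k+2)
    · have h1 : iterP (p.set rb ra) (k+3) y = iterP (p.set rb ra) (k+2) ((p.set rb ra).getD y 0) := rfl
      have h2 : (p.set rb ra).getD y 0 = p.getD y 0 := by rw [hq, if_neg hyrb]
      rw [h1, h2]
      exact ih (p.getD y 0) (hp y hy) hiter

-- counting under the relabelling map
lemma count_map_merge (lab : List Nat) (la lb : Nat) (hne : la ≠ lb) :
    (lab.map (fun v => if v = lb then la else v)).count la = lab.count la + lab.count lb := by
  induction lab with
  | nil => rfl
  | cons v t ih =>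
    by_cases hv : v = lb
    · subst hv
      simp only [List.map_cons, if_pos rfl, List.count_cons]
      simp [ih, hne, Nat.add_assoc]
      omega
    · simp only [List.map_cons, if_neg hv, List.count_cons]
      simp [ih, hv]
      by_cases hv2 : v = la <;> simp [hv2] <;> omega

lemma count_map_other (lab : List Nat) (la lb r : Nat) (h1 : r ≠ la) (h2 : r ≠ lb) :
    (lab.map (fun v => if v = lb then la else v)).count r = lab.count r := by
  induction lab with
  | nil => rfl
  | cons v t ih =>
    by_cases hv : v = lb
    · subst hv
      simp only [List.map_cons, if_pos rfl, List.count_cons]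
      simp [ih, Ne.symm h1, Ne.symm h2]
    · simp only [List.map_cons, if_neg hv, List.count_cons]
      simp [ih]

lemma getD_setI (l : List Int) (i : Nat) (a : Int) (j : Nat) (hi : i < l.length) :
    (l.set i a).getD j 0 = if j = i then a else l.getD j 0 := by
  rw [List.getD, List.getElem?_set]
  by_cases h : i = j
  · subst h; simp [hi]
  · simp [h, List.getD, Ne.symm h]

-- one union/merge step preserves the full simulation invariant
lemma union_sim (sz : Nat) (lab : List Nat) (pc : List Nat × List Int) (a b : Nat)
    (hG : GOOD sz lab pc.1 pc.2) (ha : a < sz) (hb : b < sz) :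
    GOOD sz (mergeB lab a b) (unionA pc a b).1 (unionA pc a b).2 := by
  obtain ⟨hL, hI, hC⟩ := hG
  obtain ⟨hf1res, hf1inv, hf1roots⟩ := findA_correct sz lab pc.1 a hL hI ha
  obtain ⟨hf2res, hf2inv, hf2roots⟩ := findA_correct sz lab (findA pc.1 a).1 b hL hf1inv hb
  obtain ⟨hlablen, hlab⟩ := hL
  obtain ⟨hp2len, hp2step, hp2conv⟩ := hf2inv
  obtain ⟨hclen, hcnt⟩ := hC
  have hla : lab.getD a 0 < sz := (hlab a ha).1
  have hlb : lab.getD b 0 < sz := (hlab b hb).1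
  have hlabla : lab.getD (lab.getD a 0) 0 = lab.getD a 0 := (hlab a ha).2
  have hlablb : lab.getD (lab.getD b 0) 0 = lab.getD b 0 := (hlab b hb).2
  have hp2ra : (findA (findA pc.1 a).1 b).1.getD (lab.getD a 0) 0 = lab.getD a 0 :=
    (hp2step a ha).2.2
  have hp2rb : (findA (findA pc.1 a).1 b).1.getD (lab.getD b 0) 0 = lab.getD b 0 :=
    (hp2step b hb).2.2
  have hrootchain : ∀ y, y < sz →
      ((findA (findA pc.1 a).1 b).1.getD y 0 = y ↔ pc.1.getD y 0 = y) :=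
    fun y hy => (hf2roots y hy).trans (hf1roots y hy)
  unfold unionA mergeB
  simp only [hf1res, hf2res]
  split_ifs with hab
  · have hq3 : ∀ y, ((findA (findA pc.1 a).1 b).1.set (lab.getD b 0) (lab.getD a 0)).getD y 0
        = if y = lab.getD b 0 then lab.getD a 0
          else (findA (findA pc.1 a).1 b).1.getD y 0 :=
      fun y => getD_set' _ _ y _ (hp2len ▸ hlb)
    have hlab' : ∀ y, y < sz →
        (lab.map (fun v => if v = lab.getD b 0 then lab.getD a 0 else v)).getD y 0
        = if lab.getD y 0 = lab.getD b 0 then lab.getD a 0 else lab.getD y 0 :=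
      fun y hy => getD_map' lab _ y (hlablen ▸ hy)
    refine ⟨⟨by simp [hlablen], ?_⟩, ⟨by simp [hp2len], ?_, ?_⟩, ⟨by simp [hclen], ?_⟩⟩
    · intro y hy
      rw [hlab' y hy]
      by_cases hylb : lab.getD y 0 = lab.getD b 0
      · rw [if_pos hylb]
        refine ⟨hla, ?_⟩
        rw [hlab' _ hla, hlabla, if_neg hab]
      · rw [if_neg hylb]
        refine ⟨(hlab y hy).1, ?_⟩
        rw [hlab' _ (hlab y hy).1, (hlab y hy).2, if_neg hylb]
    · intro y hy
      rw [hq3]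
      by_cases hylb : y = lab.getD b 0
      · rw [if_pos hylb]
        refine ⟨hla, ?_, ?_⟩
        · rw [hlab' _ hla, hlabla, if_neg hab, hlab' y hy, hylb, hlablb, if_pos rfl]
        · rw [hlab' y hy, hylb, hlablb, if_pos rfl, hq3, if_neg (fun h => hab h), hp2ra]
      · rw [if_neg hylb]
        have hp2y : (findA (findA pc.1 a).1 b).1.getD y 0 < sz := (hp2step y hy).1
        refine ⟨hp2y, ?_, ?_⟩
        · rw [hlab' _ hp2y, (hp2step y hy).2.1, hlab' y hy]
        · rw [hlab' y hy]
          by_cases hyl : lab.getD y 0 = lab.getD b 0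
          · rw [if_pos hyl, hq3, if_neg (fun h => hab h), hp2ra]
          · rw [if_neg hyl, hq3, if_neg hyl, (hp2step y hy).2.2]
    · intro y hy
      by_cases hyl : lab.getD y 0 = lab.getD b 0
      · obtain ⟨k, hk⟩ := hp2conv y hy
        refine ⟨k + 2, ?_⟩
        rw [hlab' y hy, if_pos hyl]
        exact iter_set_rb sz _ (lab.getD b 0) (lab.getD a 0) hp2len hlb hla
          (fun z hz => (hp2step z hz).1) hp2ra (fun h => hab h) k y hy (by rw [hk, hyl])
      · obtain ⟨k, hk⟩ := hp2conv y hy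
        refine ⟨k, ?_⟩
        rw [hlab' y hy, if_neg hyl]
        exact iter_set_ne sz lab _ (lab.getD b 0) (lab.getD a 0) hp2len hlb
          (fun z hz => (hp2step z hz).1) (fun z hz => (hp2step z hz).2.1) hlablb
          k y hy hyl hk
    · intro r hr hroot
      have hrlb : r ≠ lab.getD b 0 := by
        intro h
        rw [hq3, if_pos h] at hroot
        exact hab (by rw [hroot]; exact h)
      rw [hq3, if_neg hrlb] at hroot
      have hrootp : pc.1.getD r 0 = r := (hrootchain r hr).mp hroot
      by_cases hrla : r = lab.getD a 0
      · rw [getD_setI _ _ _ _ (hclen ▸ hla), if_pos hrla]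
        have hca : pc.2.getD (lab.getD a 0) 0 = (lab.count (lab.getD a 0) : Int) := by
          rw [← hrla]; exact (hrla ▸ hcnt r hr hrootp)
        have hcb : pc.2.getD (lab.getD b 0) 0 = (lab.count (lab.getD b 0) : Int) := by
          refine hcnt _ hlb ?_
          exact (hrootchain _ hlb).mp hp2rb
        rw [hca, hcb, hrla, count_map_merge lab _ _ (fun h => hab h)]
        push_cast
        ring
      · rw [getD_setI _ _ _ _ (hclen ▸ hla), if_neg hrla]
        rw [hcnt r hr hrootp, count_map_other lab _ _ r hrla hrlb]
  · push_neg at hab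
    refine ⟨⟨hlablen, hlab⟩, ⟨hp2len, hp2step, hp2conv⟩, ⟨hclen, ?_⟩⟩
    intro r hr hroot
    exact hcnt r hr ((hrootchain r hr).mp hroot)

lemma tid_lt (n m i j t : Nat) (hi : i < n) (hj : j < m) (ht : t < 2) :
    pvTid m i j t < 2*n*m := by
  have h1 : (i+1) * m ≤ n * m := Nat.mul_le_mul_right m hi
  unfold pvTid
  nlinarith

-- one guarded union of A against B's fold over the corresponding guarded edge segment
lemma cond_sim (sz : Nat) (c : Prop) [Decidable c] (pc : List Nat × List Int)
    (lab : List Nat) (a b : Nat) (hab : c → a < sz ∧ b < sz)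
    (hG : GOOD sz lab pc.1 pc.2) :
    GOOD sz ((if c then [(a, b)] else []).foldl (fun l e => mergeB l e.1 e.2) lab)
      (condUnion c pc a b).1 (condUnion c pc a b).2 := by
  unfold condUnion
  split_ifs with h
  · simpa [List.foldl] using union_sim sz lab pc a b hG (hab h).1 (hab h).2
  · exact hG

-- one cell of A against B's fold over that cell's edge list
lemma cell_sim (n m : Nat) (d : Int) (i j : Nat) (hi : i < n) (hj : j < m)
    (pc : List Nat × List Int) (lab : List Nat)
    (hG : GOOD (2*n*m) lab pc.1 pc.2) :
    GOOD (2*n*m) ((edgesOfCell n m d i j).foldl (fun l e => mergeB l e.1 e.2) lab)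
      (cellA n m d i j pc).1 (cellA n m d i j pc).2 := by
  have t0 : (0:Nat) < 2 := by omega
  have t1 : (1:Nat) < 2 := by omega
  unfold cellA edgesOfCell
  by_cases hd : d = 1
  · simp only [if_pos hd, List.foldl_append]
    refine cond_sim _ _ _ _ _ _ (fun h => ⟨tid_lt n m i j 1 hi hj t1,
      tid_lt n m i (j+1) 0 hi (by omega) t0⟩) ?_
    refine cond_sim _ _ _ _ _ _ (fun h => ⟨tid_lt n m i j 1 hi hj t1,
      tid_lt n m (i+1) j 0 (by omega) hj t0⟩) ?_
    refine cond_sim _ _ _ _ _ _ (fun h => ⟨tid_lt n m i j 0 hi hj t0,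
      tid_lt n m i (j-1) 1 hi (by omega) t1⟩) ?_
    exact cond_sim _ _ _ _ _ _ (fun h => ⟨tid_lt n m i j 0 hi hj t0,
      tid_lt n m (i-1) j 1 (by omega) hj t1⟩) hG
  · simp only [if_neg hd, List.foldl_append]
    refine cond_sim _ _ _ _ _ _ (fun h => ⟨tid_lt n m i j 1 hi hj t1,
      tid_lt n m i (j-1) 0 hi (by omega) t0⟩) ?_
    refine cond_sim _ _ _ _ _ _ (fun h => ⟨tid_lt n m i j 1 hi hj t1,
      tid_lt n m (i+1) j 0 (by omega) hj t0⟩) ?_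
    refine cond_sim _ _ _ _ _ _ (fun h => ⟨tid_lt n m i j 0 hi hj t0,
      tid_lt n m i (j+1) 1 hi (by omega) t1⟩) ?_
    exact cond_sim _ _ _ _ _ _ (fun h => ⟨tid_lt n m i j 0 hi hj t0,
      tid_lt n m (i-1) j 1 (by omega) hj t1⟩) hG

lemma foldl_rel {α β γ : Type} (R : α → β → Prop) (f : α → γ → α) (g : β → γ → β) :
    ∀ (L : List γ) (a : α) (b : β),
      (∀ a b x, x ∈ L → R a b → R (f a x) (g b x)) → R a b →
      R (L.foldl f a) (L.foldl g b) := by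
  intro L
  induction L with
  | nil => intro a b _ h0; exact h0
  | cons x t ih =>
    intro a b hs h0
    exact ih (f a x) (g b x) (fun a' b' y hy => hs a' b' y (List.mem_cons_of_mem x hy))
      (hs a b x List.mem_cons_self h0)

lemma foldl_flatMap' {α γ : Type} (f : α → γ → α) (g : Nat → List γ) (L : List Nat) (a : α) :
    (L.flatMap g).foldl f a = L.foldl (fun a i => (g i).foldl f a) a := by
  induction L generalizing a with
  | nil => rfl
  | cons x t ih => simp [List.flatMap_cons, List.foldl_append, ih]

lemma GOOD_init (sz : Nat) :
    GOOD sz (List.range sz) (List.range sz) (List.replicate sz (1:Int)) := by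
  refine ⟨⟨List.length_range, ?_⟩, ⟨List.length_range, ?_, ?_⟩,
    ⟨List.length_replicate, ?_⟩⟩
  · intro y hy
    simp only [getD_range' sz y hy]
    exact ⟨hy, trivial⟩
  · intro y hy
    simp only [getD_range' sz y hy]
    exact ⟨hy, trivial, trivial⟩
  · intro y hy
    exact ⟨0, (getD_range' sz y hy).symm⟩
  · intro r hr _
    have h1 : (List.replicate sz (1:Int)).getD r 0 = 1 := by simp [List.getD, hr]
    have h2 : (List.range sz).count r = 1 :=
      List.count_eq_one_of_mem List.nodup_range (by simpa using hr)
    rw [h1, h2]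
    rfl

lemma loop_sim (grid : List (List Int)) (n m : Nat) :
    GOOD (2*n*m) ((edgeList grid n m).foldl (fun l e => mergeB l e.1 e.2) (List.range (2*n*m)))
      (loopA grid n m).1 (loopA grid n m).2 := by
  unfold loopA edgeList
  rw [foldl_flatMap']
  refine foldl_rel (fun (pc : List Nat × List Int) (l : List Nat) => GOOD (2*n*m) l pc.1 pc.2)
    _ _ (List.range n) _ _ ?_ (GOOD_init (2*n*m))
  intro pc l i hi hG
  have hi' : i < n := List.mem_range.mp hi
  rw [foldl_flatMap']
  refine foldl_rel (fun (pc : List Nat × List Int) (l : List Nat) => GOOD (2*n*m) l pc.1 pc.2)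
    _ _ (List.range m) _ _ ?_ hG
  intro pc' l' j hj hG'
  exact cell_sim n m _ i j hi' (List.mem_range.mp hj) pc' l' hG'

-- the two final passes agree under the invariant
lemma final_eq (sz : Nat) (lab p : List Nat) (c : List Int)
    (hG : GOOD sz lab p c) :
    (List.range sz).foldl
      (fun ans i => if p.getD i 0 = i then max ans (c.getD i 0) else ans) 0
    = (List.range sz).foldl
      (fun best r => if lab.getD r 0 = r then max best ((lab.count r : Int)) else best) 0 := by
  obtain ⟨⟨hlablen, hlab⟩, ⟨hplen, hpstep, hpconv⟩, ⟨hclen, hcnt⟩⟩ := hG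
  apply PySem.List.foldl_congr_mem
  intro acc i hi
  have hi' : i < sz := List.mem_range.mp hi
  have hiff : p.getD i 0 = i ↔ lab.getD i 0 = i := by
    constructor
    · intro hroot
      obtain ⟨k, hk⟩ := hpconv i hi'
      rw [← hk, iterP_fix p i hroot]
    · intro hlabi
      have := (hpstep i hi').2.2
      rw [hlabi] at this
      exact this
  by_cases hroot : p.getD i 0 = i
  · rw [if_pos hroot, if_pos (hiff.mp hroot), hcnt i hi' hroot]
  · rw [if_neg hroot, if_neg (fun h => hroot (hiff.mpr h))]

-- ===== VERDICT =====
theorem solution_spec : Claim_equal_solution := by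
  intro grid _ _
  unfold Spec_solution solution solution_alt
  exact final_eq (2 * grid.length * (grid.headD []).length) _ _ _
    (loop_sim grid grid.length (grid.headD []).length)
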